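-- pv_equiv track=rewrite | github.com/SomeUser55/level1 | for_dict_challenges.py | count_gender_by_class
-- ===== SOURCE A (Python) =====
-- def count_gender_by_class(students):
--     gender_count_by_class = {}
--     for student in students:
--         class_id = student['class_id']
--         if class_id not in gender_count_by_class:
--             gender_count_by_class[class_id] = {'male': 0, 'female': 0}
--
--         if student['gender'] == 'male':
--             gender_count_by_class[class_id]['male'] += 1
--         else:
--             gender_count_by_class[class_id]['female'] += 1
--
--     return gender_count_by_class
-- ===== SOURCE B (Python) =====
-- def count_gender_by_class(students):
--     # Pass 1: tally totals-per-class and males-per-class; pass 2: emit in insertion order.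
--     totals = {}
--     males = {}
--     for student in students:
--         class_id = student['class_id']
--         totals[class_id] = totals.get(class_id, 0) + 1
--         if student['gender'] == 'male':
--             males[class_id] = males.get(class_id, 0) + 1
--     return {c: {'male': males.get(c, 0), 'female': t - males.get(c, 0)}
--             for c, t in totals.items()}
-- ===== Notes on version B (the rewrite author's own statement) =====
-- stated objective: alternative
-- what changed: Replaces the single incremental loop over a dict of nested male/female dicts with a build-index-then-emit shape: one pass tallies two flat counters (total per class, males per class), then a second pass emits {'male': m, 'female': total - m} per class in first-appearance order.
import Mathlib
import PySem

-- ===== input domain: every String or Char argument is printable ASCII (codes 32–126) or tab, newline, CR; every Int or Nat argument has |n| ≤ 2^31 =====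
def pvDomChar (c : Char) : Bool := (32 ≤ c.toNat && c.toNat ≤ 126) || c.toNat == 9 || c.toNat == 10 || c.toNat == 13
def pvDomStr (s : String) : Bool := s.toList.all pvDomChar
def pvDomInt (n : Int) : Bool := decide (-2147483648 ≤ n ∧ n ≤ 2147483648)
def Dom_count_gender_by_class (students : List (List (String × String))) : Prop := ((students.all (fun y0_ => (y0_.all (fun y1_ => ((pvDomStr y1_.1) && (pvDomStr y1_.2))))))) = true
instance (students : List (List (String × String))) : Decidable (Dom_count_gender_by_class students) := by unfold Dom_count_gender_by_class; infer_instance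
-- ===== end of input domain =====

-- B replaces A's single incremental loop over nested per-class dicts with a tally-then-emit
-- decomposition (two flat counters, then one emitting pass); same O(n) cost, alternative structure.


-- ===== PORT A =====
-- student['class_id'] / student['gender'] raise KeyError when missing; Pre_ excludes that,
-- so the getD default "" is never the value Python raises on inside Pre_.
def count_gender_by_class (students : List (List (String × String))) : List (String × List (String × Int)) :=
  let gcc := students.foldl (fun gcc student =>
    let class_id := (PySem.Dict.mk student).getD "class_id" ""
    let gcc := if gcc.contains class_id then gcc
               else gcc.insert class_id (PySem.Dict.mk [("male", (0 : Int)), ("female", 0)])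
    if (PySem.Dict.mk student).getD "gender" "" == "male" then
      gcc.modify class_id PySem.Dict.empty (fun inner => inner.modify "male" 0 (· + 1))
    else
      gcc.modify class_id PySem.Dict.empty (fun inner => inner.modify "female" 0 (· + 1)))
    PySem.Dict.empty
  gcc.items.map (fun p => (p.1, p.2.items))

-- ===== PORT B =====
def count_gender_by_class_alt (students : List (List (String × String))) : List (String × List (String × Int)) :=
  let st := students.foldl (fun st student =>
    let class_id := (PySem.Dict.mk student).getD "class_id" ""
    let totals := st.1.insert class_id (st.1.getD class_id 0 + 1)
    let males := if (PySem.Dict.mk student).getD "gender" "" == "male"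
                 then st.2.insert class_id (st.2.getD class_id 0 + 1) else st.2
    (totals, males))
    (PySem.Dict.empty, PySem.Dict.empty)
  st.1.items.map (fun p => (p.1, [("male", st.2.getD p.1 0), ("female", p.2 - st.2.getD p.1 0)]))

-- ===== PRECONDITION & SPEC =====
-- Pre_ excludes exactly the students missing a 'class_id' or 'gender' key, on which Python A raises KeyError.
def Pre_count_gender_by_class (students : List (List (String × String))) : Prop :=
  ∀ s ∈ students, "class_id" ∈ s.map Prod.fst ∧ "gender" ∈ s.map Prod.fst
instance (students : List (List (String × String))) : Decidable (Pre_count_gender_by_class students) := by unfold Pre_count_gender_by_class; infer_instance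
def pvWitness_count_gender_by_class : (List (List (String × String))) :=
  [[("class_id", "1"), ("gender", "male")], [("class_id", "2"), ("gender", "female")]]

def Spec_count_gender_by_class (students : List (List (String × String))) (out : List (String × List (String × Int))) : Prop := out = count_gender_by_class_alt students
instance (students : List (List (String × String))) (out : List (String × List (String × Int))) : Decidable (Spec_count_gender_by_class students out) := by unfold Spec_count_gender_by_class; infer_instance

-- ===== CLAIM (what is proved, stated in full; the proofs are below) =====
def Claim_equal_count_gender_by_class : Prop := ∀ (students : List (List (String × String))), Dom_count_gender_by_class students → Pre_count_gender_by_class students → Spec_count_gender_by_class students (count_gender_by_class students)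

-- ===== LEMMAS AND PROOFS =====

-- A's loop body and B's loop body, named for the proofs (definitionally the ports' lambdas).
def pvStepA (gcc : PySem.Dict String (PySem.Dict String Int)) (student : List (String × String)) :
    PySem.Dict String (PySem.Dict String Int) :=
  let class_id := (PySem.Dict.mk student).getD "class_id" ""
  let gcc := if gcc.contains class_id then gcc
             else gcc.insert class_id (PySem.Dict.mk [("male", (0 : Int)), ("female", 0)])
  if (PySem.Dict.mk student).getD "gender" "" == "male" then
    gcc.modify class_id PySem.Dict.empty (fun inner => inner.modify "male" 0 (· + 1))
  else
    gcc.modify class_id PySem.Dict.empty (fun inner => inner.modify "female" 0 (· + 1))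

def pvStepB (st : PySem.Dict String Int × PySem.Dict String Int) (student : List (String × String)) :
    PySem.Dict String Int × PySem.Dict String Int :=
  let class_id := (PySem.Dict.mk student).getD "class_id" ""
  let totals := st.1.insert class_id (st.1.getD class_id 0 + 1)
  let males := if (PySem.Dict.mk student).getD "gender" "" == "male"
               then st.2.insert class_id (st.2.getD class_id 0 + 1) else st.2
  (totals, males)

-- Simulation invariant between A's accumulator and B's pair of counters.
def pvInv (dA : PySem.Dict String (PySem.Dict String Int)) (totals males : PySem.Dict String Int) : Prop :=
  dA.keys = totals.keys ∧ totals.keys.Nodup ∧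
  (∀ c, totals.contains c = false → males.contains c = false) ∧
  (∀ c, totals.contains c = true → dA.getD c PySem.Dict.empty =
    PySem.Dict.mk [("male", males.getD c 0), ("female", totals.getD c 0 - males.getD c 0)])

lemma pvbump_male (m f : Int) :
    (PySem.Dict.mk [("male", m), ("female", f)]).modify "male" 0 (· + 1) =
      PySem.Dict.mk [("male", m + 1), ("female", f)] := by
  apply PySem.Dict.ext
  simp [PySem.Dict.modify, PySem.Dict.items_insert, PySem.Dict.getD, PySem.Dict.get?]

lemma pvbump_female (m f : Int) :
    (PySem.Dict.mk [("male", m), ("female", f)]).modify "female" 0 (· + 1) =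
      PySem.Dict.mk [("male", m), ("female", f + 1)] := by
  apply PySem.Dict.ext
  simp [PySem.Dict.modify, PySem.Dict.items_insert, PySem.Dict.getD, PySem.Dict.get?]

lemma pvInv_step (dA : PySem.Dict String (PySem.Dict String Int)) (totals males : PySem.Dict String Int)
    (h : pvInv dA totals males) (s : List (String × String)) :
    pvInv (pvStepA dA s) (pvStepB (totals, males) s).1 (pvStepB (totals, males) s).2 := by
  obtain ⟨hk, hnd, hm, hv⟩ := h
  have hcontains : ∀ x, dA.contains x = totals.contains x := by
    intro x
    rw [PySem.Dict.contains_eq_decide_mem_keys, PySem.Dict.contains_eq_decide_mem_keys, hk]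
  simp only [pvStepA, pvStepB]
  set c := (PySem.Dict.mk s).getD "class_id" "" with hc
  -- the third invariant clause, proved once for both shapes of the males update
  have hm' : ∀ v : Int, ∀ x, (totals.insert c (totals.getD c 0 + 1)).contains x = false →
      (males.insert c v).contains x = false := by
    intro v x hx
    rw [PySem.Dict.contains_insert] at hx ⊢
    rcases Bool.or_eq_false_iff.mp hx with ⟨h1, h2⟩
    simp [h1, hm x h2]
  have hm'' : ∀ x, (totals.insert c (totals.getD c 0 + 1)).contains x = false →
      males.contains x = false := by
    intro x hx
    rw [PySem.Dict.contains_insert] at hx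
    exact hm x (Bool.or_eq_false_iff.mp hx).2
  by_cases hg : ((PySem.Dict.mk s).getD "gender" "" == "male") = true
  · rw [if_pos hg, if_pos hg]
    by_cases hct : totals.contains c = true
    · -- class already present, male student
      have hdc : dA.contains c = true := by rw [hcontains]; exact hct
      rw [if_pos hdc]
      refine ⟨?_, PySem.Dict.nodup_keys_insert _ _ _ hnd, hm' _, ?_⟩
      · rw [PySem.Dict.modify, PySem.Dict.keys_insert_of_contains _ _ hdc,
            PySem.Dict.keys_insert_of_contains _ _ hct, hk]
      · intro x hx
        by_cases hxc : x = c
        · subst hxc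
          rw [PySem.Dict.getD_modify_self, hv c hct, pvbump_male,
              PySem.Dict.getD_insert_self, PySem.Dict.getD_insert_self]
          have e : totals.getD c 0 + 1 - (males.getD c 0 + 1) = totals.getD c 0 - males.getD c 0 := by
            ring
          rw [e]
        · have hx' : totals.contains x = true := by
            rw [PySem.Dict.contains_insert] at hx
            simpa [hxc] using hx
          rw [PySem.Dict.getD_modify, if_neg hxc, PySem.Dict.getD_insert, if_neg hxc,
              PySem.Dict.getD_insert, if_neg hxc]
          exact hv x hx'
    · -- new class, male student
      have hct' : totals.contains c = false := by simpa using hct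
      have hdc : dA.contains c = false := by rw [hcontains]; exact hct'
      have ht0 : totals.getD c 0 = 0 := PySem.Dict.getD_of_not_contains _ _ hct'
      have hmm0 : males.getD c 0 = 0 := PySem.Dict.getD_of_not_contains _ _ (hm c hct')
      rw [if_neg (by simp [hdc])]
      refine ⟨?_, PySem.Dict.nodup_keys_insert _ _ _ hnd, hm' _, ?_⟩
      · rw [PySem.Dict.modify,
            PySem.Dict.keys_insert_of_contains _ _ (PySem.Dict.contains_insert_self _ _ _),
            PySem.Dict.keys_insert_of_not_contains _ _ hdc,
            PySem.Dict.keys_insert_of_not_contains _ _ hct', hk]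
      · intro x hx
        by_cases hxc : x = c
        · subst hxc
          rw [PySem.Dict.getD_modify_self, PySem.Dict.getD_insert_self, pvbump_male,
              PySem.Dict.getD_insert_self, PySem.Dict.getD_insert_self, ht0, hmm0]
          norm_num
        · have hx' : totals.contains x = true := by
            rw [PySem.Dict.contains_insert] at hx
            simpa [hxc] using hx
          rw [PySem.Dict.getD_modify, if_neg hxc, PySem.Dict.getD_insert, if_neg hxc,
              PySem.Dict.getD_insert, if_neg hxc, PySem.Dict.getD_insert, if_neg hxc]
          exact hv x hx'
  · rw [if_neg hg, if_neg hg]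
    by_cases hct : totals.contains c = true
    · -- class already present, non-male student
      have hdc : dA.contains c = true := by rw [hcontains]; exact hct
      rw [if_pos hdc]
      refine ⟨?_, PySem.Dict.nodup_keys_insert _ _ _ hnd, hm'', ?_⟩
      · rw [PySem.Dict.modify, PySem.Dict.keys_insert_of_contains _ _ hdc,
            PySem.Dict.keys_insert_of_contains _ _ hct, hk]
      · intro x hx
        by_cases hxc : x = c
        · subst hxc
          rw [PySem.Dict.getD_modify_self, hv c hct, pvbump_female,
              PySem.Dict.getD_insert_self]
          have e : totals.getD c 0 + 1 - males.getD c 0 =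
              totals.getD c 0 - males.getD c 0 + 1 := by ring
          rw [e]
        · have hx' : totals.contains x = true := by
            rw [PySem.Dict.contains_insert] at hx
            simpa [hxc] using hx
          rw [PySem.Dict.getD_modify, if_neg hxc, PySem.Dict.getD_insert, if_neg hxc]
          exact hv x hx'
    · -- new class, non-male student
      have hct' : totals.contains c = false := by simpa using hct
      have hdc : dA.contains c = false := by rw [hcontains]; exact hct'
      have ht0 : totals.getD c 0 = 0 := PySem.Dict.getD_of_not_contains _ _ hct'
      have hmm0 : males.getD c 0 = 0 := PySem.Dict.getD_of_not_contains _ _ (hm c hct')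
      rw [if_neg (by simp [hdc])]
      refine ⟨?_, PySem.Dict.nodup_keys_insert _ _ _ hnd, hm'', ?_⟩
      · rw [PySem.Dict.modify,
            PySem.Dict.keys_insert_of_contains _ _ (PySem.Dict.contains_insert_self _ _ _),
            PySem.Dict.keys_insert_of_not_contains _ _ hdc,
            PySem.Dict.keys_insert_of_not_contains _ _ hct', hk]
      · intro x hx
        by_cases hxc : x = c
        · subst hxc
          rw [PySem.Dict.getD_modify_self, PySem.Dict.getD_insert_self, pvbump_female,
              PySem.Dict.getD_insert_self, ht0, hmm0]
          norm_num
        · have hx' : totals.contains x = true := by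
            rw [PySem.Dict.contains_insert] at hx
            simpa [hxc] using hx
          rw [PySem.Dict.getD_modify, if_neg hxc, PySem.Dict.getD_insert, if_neg hxc,
              PySem.Dict.getD_insert, if_neg hxc]
          exact hv x hx'

lemma pvInv_fold (students : List (List (String × String)))
    (dA : PySem.Dict String (PySem.Dict String Int)) (totals males : PySem.Dict String Int)
    (h : pvInv dA totals males) :
    pvInv (students.foldl pvStepA dA)
      (students.foldl pvStepB (totals, males)).1 (students.foldl pvStepB (totals, males)).2 := by
  induction students generalizing dA totals males with
  | nil => exact h
  | cons s rest ih =>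
    have := pvInv_step dA totals males h s
    simpa [List.foldl] using ih _ _ _ this

lemma pv_final (dA : PySem.Dict String (PySem.Dict String Int)) (totals males : PySem.Dict String Int)
    (h : pvInv dA totals males) :
    dA.items.map (fun p => (p.1, p.2.items)) =
      totals.items.map (fun p => (p.1, [("male", males.getD p.1 0), ("female", p.2 - males.getD p.1 0)])) := by
  obtain ⟨hk, hnd, _, hv⟩ := h
  rw [PySem.Dict.items_eq_map_keys dA (hk ▸ hnd) PySem.Dict.empty,
      PySem.Dict.items_eq_map_keys totals hnd 0, hk, List.map_map, List.map_map]
  apply List.map_congr_left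
  intro x hx
  have hct : totals.contains x = true := (PySem.Dict.contains_iff_mem_keys _ _).mpr hx
  simp [Function.comp, hv x hct]

-- ===== VERDICT (by name: the statement is the Claim_ definition above) =====
theorem count_gender_by_class_spec : Claim_equal_count_gender_by_class := by
  intro students _ _
  unfold Spec_count_gender_by_class
  have h0 : pvInv PySem.Dict.empty PySem.Dict.empty PySem.Dict.empty := by
    refine ⟨rfl, by simp [PySem.Dict.keys_empty], ?_, ?_⟩ <;> intro c h <;>
      simp_all [PySem.Dict.contains_empty]
  exact pv_final _ _ _ (pvInv_fold students _ _ _ h0)
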